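-- pv_equiv track=rewrite | github.com/DinomyteHero/Storyteller-V2 | storyteller/commands/extract_knowledge.py | _build_known_characters_list
-- ===== SOURCE A (Python) =====
-- def _build_known_characters_list(alias_lookup: dict[str, str]) -> list[str]:
--     """Build a list of known character display names from the alias lookup."""
--     # Get unique canonical IDs, then pick the longest alias for each as display name
--     id_to_names: dict[str, list[str]] = {}
--     for alias, canonical_id in alias_lookup.items():
--         id_to_names.setdefault(canonical_id, []).append(alias)
--     # Pick the longest name for each character (most complete name)
--     display_names = []
--     for canonical_id, names in id_to_names.items():
--         best = max(names, key=len)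
--         display_names.append(best.title())
--     return sorted(display_names)
-- ===== SOURCE B (Python) =====
-- def _build_known_characters_list(alias_lookup: dict[str, str]) -> list[str]:
--     """Build a list of known character display names from the alias lookup."""
--     # Single pass: keep the longest alias seen so far for each canonical id
--     # (strict '>' keeps the first-seen longest, matching max(key=len)).
--     best: dict[str, str] = {}
--     for alias, canonical_id in alias_lookup.items():
--         cur = best.get(canonical_id)
--         if cur is None or len(alias) > len(cur):
--             best[canonical_id] = alias
--     return sorted(v.title() for v in best.values())
-- ===== Notes on version B (the rewrite author's own statement) =====
-- stated objective: simpler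
-- what changed: Replaces the group-into-lists-then-max reduce with a single running-max pass that keeps only the best alias per canonical id (strict '>' preserves max's first-longest tie-break), then titles and sorts the kept values.
import Mathlib
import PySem

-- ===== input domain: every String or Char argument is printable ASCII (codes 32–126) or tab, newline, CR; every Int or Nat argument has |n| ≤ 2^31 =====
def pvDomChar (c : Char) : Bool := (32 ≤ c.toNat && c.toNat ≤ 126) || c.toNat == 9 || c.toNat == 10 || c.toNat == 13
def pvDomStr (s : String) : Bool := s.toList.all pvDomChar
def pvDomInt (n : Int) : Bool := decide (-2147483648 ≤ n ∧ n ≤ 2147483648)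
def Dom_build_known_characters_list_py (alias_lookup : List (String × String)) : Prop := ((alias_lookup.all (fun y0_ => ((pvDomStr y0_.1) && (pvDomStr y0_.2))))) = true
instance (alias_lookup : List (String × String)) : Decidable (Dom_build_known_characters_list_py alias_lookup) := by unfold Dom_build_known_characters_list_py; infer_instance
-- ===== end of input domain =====

-- B is the same task as one running-max pass (dict canonical_id -> longest alias so far) instead of
-- group-into-lists-then-max; objective: simpler (one pass, no intermediate lists).

-- shared helper: hand port of str.title(); PySem has no title. Exact on the ASCII domain, where a
-- character is "cased" for title() exactly when it is alphabetic: a letter is uppercased when the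
-- previous character is not a letter, lowercased otherwise; non-letters pass through.
def pyTitleGo (prevAlpha : Bool) : List Char → List Char
  | [] => []
  | c :: rest =>
      (if PySem.Chars.isalpha c then
        (if prevAlpha then PySem.Chars.lowerChar c else PySem.Chars.upperChar c)
      else c) :: pyTitleGo (PySem.Chars.isalpha c) rest

def pyTitle (s : String) : String := String.ofList (pyTitleGo false s.toList)

-- ===== PORT A =====
def build_known_characters_list_py (alias_lookup : List (String × String)) : List String :=
  -- id_to_names.setdefault(canonical_id, []).append(alias)
  let id_to_names : PySem.Dict String (List String) :=
    alias_lookup.foldl (fun d p => d.modify p.2 [] (fun ns => ns ++ [p.1])) PySem.Dict.empty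
  -- max(names, key=len): names is never empty here, so the "" default of maxD is unreachable
  let display_names : List String :=
    id_to_names.items.foldl
      (fun acc kv => acc ++ [pyTitle (PySem.List.maxD kv.2 PySem.Str.len "")]) []
  PySem.List.sorted display_names (fun x => x) false

-- ===== PORT B =====
def build_known_characters_list_py_alt (alias_lookup : List (String × String)) : List String :=
  let best : PySem.Dict String String :=
    alias_lookup.foldl
      (fun d p =>
        match d.get? p.2 with
        | none => d.insert p.2 p.1
        | some cur => if PySem.Str.len p.1 > PySem.Str.len cur then d.insert p.2 p.1 else d)
      PySem.Dict.empty
  PySem.List.sorted (best.values.map (fun v => pyTitle v)) (fun x => x) false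

-- ===== PRECONDITION & SPEC =====
def Spec_build_known_characters_list_py (alias_lookup : List (String × String)) (out : List String) : Prop := out = build_known_characters_list_py_alt alias_lookup
instance (alias_lookup : List (String × String)) (out : List String) : Decidable (Spec_build_known_characters_list_py alias_lookup out) := by unfold Spec_build_known_characters_list_py; infer_instance

-- ===== CLAIM (what is proved, stated in full; the proofs are below) =====
def Claim_equal_build_known_characters_list_py : Prop := ∀ (alias_lookup : List (String × String)), Dom_build_known_characters_list_py alias_lookup → Spec_build_known_characters_list_py alias_lookup (build_known_characters_list_py alias_lookup)

-- ===== LEMMAS AND PROOFS =====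

-- the per-id alias group, in input order
def aliasGroup (l : List (String × String)) (c : String) : List String :=
  (l.filter (fun p => p.2 == c)).map (fun p => p.1)

-- the running 'best so far' update, named for the lemmas
def bestStep (acc : Option String) (x : String) : Option String :=
  match acc with
  | none => some x
  | some m => if PySem.Str.len m < PySem.Str.len x then some x else some m

-- B's loop step, named for the lemmas
def stepB (d : PySem.Dict String String) (p : String × String) : PySem.Dict String String :=
  match d.get? p.2 with
  | none => d.insert p.2 p.1
  | some cur => if PySem.Str.len p.1 > PySem.Str.len cur then d.insert p.2 p.1 else d

lemma keys_insert_dict (d : PySem.Dict String String) (k v : String) :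
    (d.insert k v).keys = if d.contains k then d.keys else d.keys ++ [k] := by
  simp only [PySem.Dict.keys, PySem.Dict.items_insert]
  split
  · rw [List.map_map]
    apply List.map_congr_left
    intro p _
    by_cases h : p.1 = k <;> simp [h]
  · simp

lemma A_getD (l : List (String × String)) (c : String) :
    (l.foldl (fun d p => d.modify p.2 [] (fun ns => ns ++ [p.1])) PySem.Dict.empty).getD c []
      = aliasGroup l c := by
  have h := PySem.Dict.getD_foldl_modify_append (l.map Prod.swap) PySem.Dict.empty c
  rw [List.foldl_map] at h
  simpa [aliasGroup, List.filter_map, Function.comp, Prod.swap] using h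

lemma B_get? (l : List (String × String)) (d : PySem.Dict String String) (c : String) :
    (l.foldl stepB d).get? c
      = (aliasGroup l c).foldl bestStep (d.get? c) := by
  induction l generalizing d with
  | nil => simp [aliasGroup]
  | cons p t ih =>
    simp only [List.foldl_cons]
    rw [ih]
    by_cases hc : p.2 = c
    · subst hc
      have hstep : (stepB d p).get? p.2 = bestStep (d.get? p.2) p.1 := by
        cases h : d.get? p.2 with
        | none => simp [stepB, bestStep, h]
        | some cur =>
          simp only [stepB, bestStep, h, gt_iff_lt]
          split <;> simp [h]
      rw [hstep]
      simp [aliasGroup]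
    · have hstep : (stepB d p).get? c = d.get? c := by
        cases h : d.get? p.2 with
        | none => simp [stepB, h, PySem.Dict.get?_insert, Ne.symm hc]
        | some cur =>
          simp only [stepB, h, gt_iff_lt]
          split <;> simp [PySem.Dict.get?_insert, Ne.symm hc]
      rw [hstep]
      simp [aliasGroup, hc]

lemma B_keys (l : List (String × String)) (d : PySem.Dict String String) :
    (l.foldl stepB d).keys = PySem.Set.update d.keys (l.map (fun p => p.2)) := by
  induction l generalizing d with
  | nil => simp [PySem.Set.update]
  | cons p t ih =>
    simp only [List.foldl_cons, List.map_cons]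
    rw [ih]
    have hk : (stepB d p).keys = PySem.Set.add d.keys p.2 := by
      cases h : d.get? p.2 with
      | none =>
        have hc : d.contains p.2 = false := by
          simp [PySem.Dict.contains_eq_isSome_get?, h]
        have hm : p.2 ∉ d.keys := by
          have h2 := PySem.Dict.contains_eq_decide_mem_keys (d := d) (k := p.2)
          rw [hc] at h2
          exact of_decide_eq_false h2.symm
        simp [stepB, h, PySem.Set.add, keys_insert_dict, hc, hm]
      | some cur =>
        have hc : d.contains p.2 = true := by
          simp [PySem.Dict.contains_eq_isSome_get?, h]
        have hm : p.2 ∈ d.keys := by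
          have h2 := PySem.Dict.contains_eq_decide_mem_keys (d := d) (k := p.2)
          rw [hc] at h2
          exact of_decide_eq_true h2.symm
        simp only [stepB, h, gt_iff_lt]
        split <;> simp [PySem.Set.add, keys_insert_dict, hc, hm]
    rw [hk]
    rfl

lemma foldl_append_singleton {α β : Type} (f : α → β) (l : List α) (acc : List β) :
    l.foldl (fun acc x => acc ++ [f x]) acc = acc ++ l.map f := by
  induction l generalizing acc with
  | nil => simp
  | cons x t ih => simp [ih]

lemma max?_len_eq_foldl_bestStep (g : List String) :
    PySem.List.max? g PySem.Str.len = g.foldl bestStep none := by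
  unfold PySem.List.max?
  apply List.foldl_ext
  intro acc x _
  cases acc <;> rfl

theorem build_known_characters_list_py_main (l : List (String × String)) :
    build_known_characters_list_py l = build_known_characters_list_py_alt l := by
  show PySem.List.sorted
      ((l.foldl (fun d p => d.modify p.2 [] (fun ns => ns ++ [p.1])) PySem.Dict.empty).items.foldl
        (fun acc kv => acc ++ [pyTitle (PySem.List.maxD kv.2 PySem.Str.len "")]) [])
      (fun x => x) false
    = PySem.List.sorted
      ((l.foldl stepB PySem.Dict.empty).values.map (fun v => pyTitle v)) (fun x => x) false
  set dA := l.foldl (fun d p => d.modify p.2 [] (fun ns => ns ++ [p.1])) PySem.Dict.empty with hdA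
  set dB := l.foldl stepB PySem.Dict.empty with hdB
  -- both key lists are the ordered dedup of the canonical ids, in first-seen order
  have hkeysA : dA.keys = PySem.Set.update [] (l.map (fun p => p.2)) := by
    have h := PySem.Dict.keys_foldl_modify_key l (fun p => p.2) ([] : List String)
      (fun _ p ns => ns ++ [p.1]) PySem.Dict.empty
    simpa [hdA] using h
  have hkeysB : dB.keys = PySem.Set.update [] (l.map (fun p => p.2)) := by
    simpa using B_keys l PySem.Dict.empty
  have hnodupA : dA.keys.Nodup := by
    rw [hkeysA]; exact PySem.Set.nodup_update [] _ (by simp)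
  have hnodupB : dB.keys.Nodup := by
    rw [hkeysB]; exact PySem.Set.nodup_update [] _ (by simp)
  rw [foldl_append_singleton, PySem.Dict.items_eq_map_keys dA hnodupA ([] : List String)]
  rw [PySem.Dict.values_eq_map_keys dB hnodupB ""]
  rw [List.map_map, List.map_map, hkeysA, hkeysB]
  simp only [List.nil_append]
  congr 1
  apply List.map_congr_left
  intro c _
  have hA : dA.getD c [] = aliasGroup l c := by rw [hdA]; exact A_getD l c
  have hB : dB.getD c "" = (PySem.List.max? (aliasGroup l c) PySem.Str.len).getD "" := by
    rw [PySem.Dict.getD_eq_get?_getD, hdB, B_get? l PySem.Dict.empty c]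
    have hinit : (PySem.Dict.empty : PySem.Dict String String).get? c = none := rfl
    rw [hinit, max?_len_eq_foldl_bestStep]
  simp only [Function.comp_apply, hA, hB, PySem.List.maxD]

-- ===== VERDICT (by name: the statement is the Claim_ definition above) =====
theorem build_known_characters_list_py_spec : Claim_equal_build_known_characters_list_py := by
  intro l _
  unfold Spec_build_known_characters_list_py
  exact build_known_characters_list_py_main l
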